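-- pv_equiv track=rewrite | github.com/GopherJ/ThreeFishAndCramerShoup | lib.py | readMsg
-- ===== SOURCE A (Python) =====
-- def padRight(s, char, n):
--     return ('{:' + char + '>' + str(n) + '}').format(s)
--
-- def chunk(arr, n):
--     newArr = []
--     idx = 0
--     length = len(arr)
--     while idx < length:
--         newArr.append(arr[idx:idx+n])
--         idx += n
--     return newArr
--
-- def readMsg(str, blockSize):
--     str_utf8 = str.encode("utf-8")
--
--     # initialisation
--     numBlockByte = int(blockSize / 8)
--
--     # transfer bytes to arr of byte
--     arr = []
--     for i in range(len(str_utf8)):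
--         arr.append(str_utf8[i])
--
--     # completion according to blockSize
--     length = len(arr)
--     if length % numBlockByte != 0:
--         if length < numBlockByte:
--             decalage = numBlockByte - length
--             for k in range(decalage):
--                 arr.append(0)
--         if length > numBlockByte:
--             decalage = int(numBlockByte - (length % numBlockByte))
--             for j in range(decalage):
--                 arr.append(0)
--
--     # divise arr in subArr of 8 items
--     newArr = chunk(arr, 8)
--
--     # join subArr
--     for j in range(len(newArr)):
--         newArr[j] = ''.join([padRight(bin(c).replace('0b', ''), '0', 8) for c in newArr[j]])
--
--     # return arr of decimal
--     numBlock = int(blockSize / 64)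
--     return chunk([int('0b' + el, 2) for el in newArr], numBlock)
-- ===== SOURCE B (Python) =====
-- def readMsg(str, blockSize):
--     data = str.encode("utf-8")
--     numBlockByte = int(blockSize / 8)
--     # one modular formula replaces all of A's padding branches
--     data += b"\x00" * ((-len(data)) % numBlockByte)
--     ints = [int.from_bytes(data[i:i + 8], 'big') for i in range(0, len(data), 8)]
--     numBlock = int(blockSize / 64)
--     return [ints[i:i + numBlock] for i in range(0, len(ints), numBlock)]
-- ===== Notes on version B (the rewrite author's own statement) =====
-- stated objective: simpler
-- what changed: B computes the pad count with one modular formula (-len % numBlockByte) instead of A's three padding branches, and converts each 8-byte slice directly with int.from_bytes('big') instead of building, left-padding, joining and re-parsing 8-bit binary strings.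
-- outside the precondition, e.g. on readMsg('', 8): A returns [], B raises ValueError; on readMsg('a', 32): A does not finish within the time limit, B raises ValueError
import Mathlib
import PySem

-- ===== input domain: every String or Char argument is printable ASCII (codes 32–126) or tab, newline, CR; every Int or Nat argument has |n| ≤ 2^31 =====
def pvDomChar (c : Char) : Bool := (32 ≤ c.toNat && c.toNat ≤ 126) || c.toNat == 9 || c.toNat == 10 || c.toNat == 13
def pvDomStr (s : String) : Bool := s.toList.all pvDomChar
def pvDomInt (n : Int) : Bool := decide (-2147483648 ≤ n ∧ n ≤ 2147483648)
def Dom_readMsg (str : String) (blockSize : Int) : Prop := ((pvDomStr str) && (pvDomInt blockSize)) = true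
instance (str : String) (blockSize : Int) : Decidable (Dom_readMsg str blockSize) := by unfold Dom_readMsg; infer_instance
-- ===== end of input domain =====

-- B replaces A's three padding branches by one modular formula and the binary-string
-- build/join/reparse by big-endian byte arithmetic over sliced 8-byte groups (objective: simpler).

-- ===== PORT A =====

-- bin(n).replace('0b','') for n ≥ 1 (digit list, most significant first)
def binNatA : Nat → List Char
  | 0 => []
  | n + 1 => binNatA ((n + 1) / 2) ++ [if (n + 1) % 2 = 1 then '1' else '0']

-- bin(c).replace('0b','') for any int c (Python: bin(0) = '0b0', bin(-n) = '-0b…')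
def pyBinA (c : Int) : List Char :=
  if c < 0 then '-' :: (if (-c).toNat = 0 then ['0'] else binNatA (-c).toNat)
  else (if c.toNat = 0 then ['0'] else binNatA c.toNat)

-- padRight(s, char, n): '{:char>n}'.format(s) left-pads s with char to width n
def padRightA (s : List Char) (char : Char) (n : Nat) : List Char :=
  List.replicate (n - s.length) char ++ s

-- chunk(arr, n): the while loop slicing off n elements at a time (the n = 0 guard only
-- makes the case that loops forever in Python total; it is never reached under Pre_)
def chunkA {α : Type} (arr : List α) (n : Nat) : List (List α) :=
  if n = 0 ∨ arr = [] then [] else arr.take n :: chunkA (arr.drop n) n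
termination_by arr.length
decreasing_by
  rename_i h
  push_neg at h
  have : arr.length ≠ 0 := by simpa using (fun hl => h.2 (List.eq_nil_of_length_eq_zero hl))
  simp [List.length_drop]; omega

-- int('0b' + el, 2): base-2 parse of a digit string (exact on '0'/'1' strings,
-- which is all that A ever feeds it)
def parseBinA (s : List Char) : Int :=
  s.foldl (fun a c => 2 * a + (if c = '1' then 1 else 0)) 0

def readMsg (str : String) (blockSize : Int) : List (List Int) :=
  -- str.encode('utf-8') then the byte-copy loop: for ASCII (the stated domain) the
  -- bytes are exactly the character codes
  let arr : List Int := str.toList.map (fun c => (c.toNat : Int))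
  let numBlockByte : Int := blockSize.tdiv 8   -- int(blockSize/8): exact for |blockSize| ≤ 2^31
  let length : Int := arr.length
  let arr :=
    if PySem.Int.mod length numBlockByte ≠ 0 then
      let arr1 := if length < numBlockByte
        then arr ++ List.replicate (numBlockByte - length).toNat 0 else arr
      if length > numBlockByte
        then arr1 ++ List.replicate (numBlockByte - PySem.Int.mod length numBlockByte).toNat 0
        else arr1
    else arr
  let newArr := chunkA arr 8
  let joined := newArr.map (fun sub => sub.flatMap (fun c => padRightA (pyBinA c) '0' 8))
  let nums := joined.map parseBinA
  chunkA nums (blockSize.tdiv 64).toNat   -- int(blockSize/64)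

-- ===== PORT B =====

-- int.from_bytes(group, 'big')
def fromBytesBE (g : List Int) : Int := g.foldl (fun a b => 256 * a + b) 0

def readMsg_alt (str : String) (blockSize : Int) : List (List Int) :=
  let data : List Int := str.toList.map (fun c => (c.toNat : Int))
  let numBlockByte : Int := blockSize.tdiv 8
  let data := data ++ List.replicate (PySem.Int.mod (-(data.length : Int)) numBlockByte).toNat 0
  let ints := (PySem.List.pyRange 0 data.length 8).map
    (fun i => fromBytesBE (PySem.List.slice data (some i) (some (i + 8))))
  let numBlock : Int := blockSize.tdiv 64
  (PySem.List.pyRange 0 ints.length numBlock).map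
    (fun i => PySem.List.slice ints (some i) (some (i + numBlock)))

-- ===== PRECONDITION & SPEC =====
-- Pre_ excludes blockSize < 64: there numBlock = int(blockSize/64) ≤ 0 (or numBlockByte ≤ 0),
-- so A either raises ZeroDivisionError or loops forever in chunk on every nonempty string, and
-- returns [] on the empty string only because the chunk loop body never runs (B raises there).
def Pre_readMsg (str : String) (blockSize : Int) : Prop := 64 ≤ blockSize
instance (str : String) (blockSize : Int) : Decidable (Pre_readMsg str blockSize) := by
  unfold Pre_readMsg; infer_instance

def pvWitness_readMsg : String × Int := ("Hi", 128)

def Spec_readMsg (str : String) (blockSize : Int) (out : List (List Int)) : Prop := out = readMsg_alt str blockSize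
instance (str : String) (blockSize : Int) (out : List (List Int)) : Decidable (Spec_readMsg str blockSize out) := by unfold Spec_readMsg; infer_instance

-- ===== CLAIM (what is proved, stated in full; the proofs are below) =====
def Claim_equal_readMsg : Prop := ∀ (str : String) (blockSize : Int), Dom_readMsg str blockSize → Pre_readMsg str blockSize → Spec_readMsg str blockSize (readMsg str blockSize)

-- ===== LEMMAS AND PROOFS =====

lemma pyRange_pos_nil (a b n : Int) (hn : 0 < n) (hab : b ≤ a) :
    PySem.List.pyRange a b n = [] := by
  rw [PySem.List.pyRange_of_pos _ _ hn, if_neg (by omega)]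
  simp

lemma pyRange_pos_shift (a b n : Int) (hn : 0 < n) :
    PySem.List.pyRange a b n = (PySem.List.pyRange 0 (b - a) n).map (fun i => a + i) := by
  rw [PySem.List.pyRange_of_pos _ _ hn, PySem.List.pyRange_of_pos _ _ hn]
  rw [List.map_map]
  have hcond : (0 < b - a) = (a < b) := propext ⟨fun h => by omega, fun h => by omega⟩
  simp only [sub_zero, hcond]
  apply List.map_congr_left
  intro k _
  simp only [Function.comp_apply]
  ring

-- pyRange with positive step: cons form
lemma pyRange_pos_cons (a b n : Int) (hn : 0 < n) (hab : a < b) :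
    PySem.List.pyRange a b n = a :: PySem.List.pyRange (a + n) b n := by
  rw [PySem.List.pyRange_of_pos _ _ hn, PySem.List.pyRange_of_pos _ _ hn]
  have h1 : b - a + n - 1 = (b - a - 1) + 1 * n := by ring
  have h2 : (b - a + n - 1) / n = (b - a - 1) / n + 1 := by
    rw [h1, Int.add_mul_ediv_right _ _ (by omega)]
  have hq : 0 ≤ (b - a - 1) / n := Int.ediv_nonneg (by omega) (by omega)
  rw [if_pos hab, h2]
  by_cases hb : a + n < b
  · have h3 : b - (a + n) + n - 1 = b - a - 1 := by ring
    rw [if_pos hb, h3]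
    have : ((b - a - 1) / n + 1).toNat = ((b - a - 1) / n).toNat + 1 := by omega
    rw [this, List.range_succ_eq_map]
    simp only [List.map_cons, List.map_map]
    congr 1
    · simp
    · apply List.map_congr_left; intro k _; simp only [Function.comp_apply, Nat.succ_eq_add_one]
      push_cast; ring
  · have hz : (b - a - 1) / n = 0 := by
      apply Int.ediv_eq_zero_of_lt (by omega) (by omega)
    rw [if_neg hb, hz]
    norm_num

-- the step-n slicing comprehension is exactly chunk(l, n)
lemma chunkB_eq (n : Int) (hn : 0 < n) (l : List Int) :
    (PySem.List.pyRange 0 (l.length : Int) n).map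
      (fun i => PySem.List.slice l (some i) (some (i + n))) = chunkA l n.toNat := by
  induction hL : l.length using Nat.strong_induction_on generalizing l with
  | _ L IH =>
  subst hL
  rcases l with _ | ⟨x, xs⟩
  · rw [pyRange_pos_nil _ _ _ hn (by simp), chunkA]
    simp
  · set l := x :: xs with hl
    have hlen : 0 < l.length := by simp [hl]
    rw [pyRange_pos_cons _ _ _ hn (by exact_mod_cast hlen), List.map_cons]
    rw [chunkA, if_neg (by push_neg; exact ⟨by omega, by simp [hl]⟩)]
    congr 1
    · -- head: slice l 0 n = l.take n.toNat
      rw [PySem.List.slice_zero_start, zero_add, PySem.List.slice_to _ (by omega)]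
    · -- tail
      rw [zero_add]
      by_cases hle : (l.length : Int) ≤ n
      · rw [pyRange_pos_nil _ _ _ hn (by omega)]
        have hdrop : l.drop n.toNat = [] := by
          apply List.eq_nil_of_length_eq_zero
          simp only [List.length_drop]; omega
        rw [hdrop, chunkA]
        simp
      · have hlt : (l.drop n.toNat).length < l.length := by
          simp only [List.length_drop]; omega
        rw [← IH (l.drop n.toNat).length hlt _ rfl]
        rw [pyRange_pos_shift n ((l.length : Nat) : Int) n hn, List.map_map]
        have h : (((l.drop n.toNat).length : Nat) : Int) = (l.length : Int) - n := by
          simp only [List.length_drop]; omega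
        rw [h]
        apply List.map_congr_left
        intro j hj
        have hj0 : 0 ≤ j := by
          have := (PySem.List.mem_pyRange_iff_of_pos hn j).mp hj
          omega
        simp only [Function.comp_apply]
        obtain ⟨jn, rfl⟩ : ∃ jn : Nat, j = (jn : Int) := ⟨j.toNat, by omega⟩
        obtain ⟨nn, rfl⟩ : ∃ nn : Nat, n = (nn : Int) := ⟨n.toNat, by omega⟩
        simp only [← Nat.cast_add, PySem.List.slice_natCast, Int.toNat_natCast]
        rw [List.drop_drop]
        congr 1
        omega

-- (-len) mod nb for 0 < nb, in terms of len mod nb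
lemma neg_emod_pos (len nb : Int) (hnb : 0 < nb) :
    (-len) % nb = if len % nb = 0 then 0 else nb - len % nb := by
  have hd : len = nb * (len / nb) + len % nb := (Int.ediv_add_emod len nb).symm
  have h1 : -len = -(len % nb) + nb * (-(len / nb)) := by rw [mul_neg]; omega
  have h2 : (-len) % nb = (-(len % nb)) % nb := by
    rw [h1, Int.add_mul_emod_self_left]
  by_cases hz : len % nb = 0
  · simp [h2, hz]
  · have hr0 : 0 ≤ len % nb := Int.emod_nonneg _ (by omega)
    have hr1 : len % nb < nb := Int.emod_lt_of_pos _ hnb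
    have h3 : -(len % nb) = (nb - len % nb) + nb * (-1) := by ring
    rw [if_neg hz, h2, h3, Int.add_mul_emod_self_left, Int.emod_eq_of_lt (by omega) (by omega)]

-- A's branchy padding equals B's single modular padding
lemma pad_eq (arr : List Int) (nb : Int) (hnb : 0 < nb) :
    (if PySem.Int.mod (arr.length : Int) nb ≠ 0 then
      let arr1 := if (arr.length : Int) < nb
        then arr ++ List.replicate (nb - (arr.length : Int)).toNat 0 else arr
      if (arr.length : Int) > nb
        then arr1 ++ List.replicate (nb - PySem.Int.mod (arr.length : Int) nb).toNat 0
        else arr1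
    else arr)
    = arr ++ List.replicate (PySem.Int.mod (-(arr.length : Int)) nb).toNat 0 := by
  set len : Int := (arr.length : Int) with hlen
  have hlen0 : 0 ≤ len := by simp [hlen]
  simp only [PySem.Int.mod_eq_emod_of_pos hnb]
  rw [neg_emod_pos len nb hnb]
  by_cases hz : len % nb = 0
  · simp [hz]
  · rw [if_pos (by exact hz), if_neg hz]
    have hr0 : 0 ≤ len % nb := Int.emod_nonneg _ (by omega)
    have hr1 : len % nb < nb := Int.emod_lt_of_pos _ hnb
    by_cases hlt : len < nb
    · have hmod : len % nb = len := Int.emod_eq_of_lt hlen0 hlt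
      rw [if_pos hlt, if_neg (by omega), hmod]
    · have hne : len ≠ nb := by intro h; apply hz; rw [h]; simp
      have hgt : len > nb := by omega
      rw [if_neg hlt, if_pos hgt]

-- folding zero digits multiplies the accumulator by a power of two
lemma foldl_zeros (m : Nat) (a : Int) :
    (List.replicate m '0').foldl (fun x ch => 2 * x + (if ch = '1' then 1 else 0)) a
      = a * 2 ^ m := by
  induction m generalizing a with
  | zero => simp
  | succ m ih =>
    have hch : (if ('0' : Char) = '1' then (1 : Int) else 0) = 0 := by decide
    rw [List.replicate_succ, List.foldl_cons, hch, add_zero, ih, pow_succ]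
    ring

-- folding the digits of bin(n) appends n in binary to the accumulator
lemma foldl_binNatA (n : Nat) : ∀ a : Int,
    (binNatA n).foldl (fun x ch => 2 * x + (if ch = '1' then 1 else 0)) a
      = a * 2 ^ (binNatA n).length + n := by
  induction n using Nat.strong_induction_on with
  | _ n IH =>
  intro a
  match n with
  | 0 => simp [binNatA]
  | n + 1 =>
    rw [binNatA, List.foldl_append, IH ((n + 1) / 2) (by omega) a, List.foldl_cons,
        List.length_append]
    have hdiv : 2 * ((n + 1) / 2) + (n + 1) % 2 = n + 1 := by omega
    rcases Nat.mod_two_eq_zero_or_one (n + 1) with h | h <;>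
      · rw [h]
        simp only [List.foldl_nil, List.length_cons, List.length_nil, if_true]
        push_cast
        rw [pow_succ]
        nlinarith [hdiv, h]

-- bin(n) has at most k digits when n < 2^k
lemma binNatA_len (k : Nat) : ∀ n : Nat, n < 2 ^ k → (binNatA n).length ≤ k := by
  induction k with
  | zero =>
    intro n hn
    interval_cases n
    simp [binNatA]
  | succ k ih =>
    intro n hn
    match n with
    | 0 => simp [binNatA]
    | n + 1 =>
      rw [binNatA, List.length_append]
      have hq : (n + 1) / 2 < 2 ^ k := by
        rw [Nat.div_lt_iff_lt_mul (by omega)]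
        rw [pow_succ] at hn
        omega
      have := ih ((n + 1) / 2) hq
      simp only [List.length_cons, List.length_nil]
      omega

-- per byte: parsing its zero-padded 8-bit binary string multiplies the accumulator
-- by 256 and adds the byte
lemma parse_pad8 (a c : Int) (h0 : 0 ≤ c) (h1 : c < 256) :
    (padRightA (pyBinA c) '0' 8).foldl (fun x ch => 2 * x + (if ch = '1' then 1 else 0)) a
      = 256 * a + c := by
  unfold padRightA pyBinA
  rw [if_neg (by omega)]
  by_cases hz : c.toNat = 0
  · rw [if_pos hz]
    have hc0 : c = 0 := by omega
    subst hc0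
    simp [List.replicate_succ, List.foldl]
    ring
  · rw [if_neg hz]
    rw [List.foldl_append, foldl_zeros, foldl_binNatA]
    have hlen : (binNatA c.toNat).length ≤ 8 :=
      binNatA_len 8 c.toNat (by omega)
    have hpow : (2 : Int) ^ (8 - (binNatA c.toNat).length) * 2 ^ (binNatA c.toNat).length
        = 256 := by
      rw [← pow_add]
      have h8 : 8 - (binNatA c.toNat).length + (binNatA c.toNat).length = 8 := by omega
      rw [h8]; norm_num
    have hc : ((c.toNat : Nat) : Int) = c := by omega
    rw [mul_assoc, hpow, hc]
    ring

-- per chunk of bytes < 256: A's join-and-parse equals B's int.from_bytes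
lemma parse_chunk (g : List Int) (hg : ∀ c ∈ g, 0 ≤ c ∧ c < 256) :
    parseBinA (g.flatMap (fun c => padRightA (pyBinA c) '0' 8)) = fromBytesBE g := by
  unfold parseBinA fromBytesBE
  suffices h : ∀ a : Int,
      (g.flatMap (fun c => padRightA (pyBinA c) '0' 8)).foldl
        (fun x ch => 2 * x + (if ch = '1' then 1 else 0)) a
      = g.foldl (fun x b => 256 * x + b) a from h 0
  induction g with
  | nil => intro a; simp
  | cons c g ih =>
    intro a
    have hc := hg c (by simp)
    rw [List.flatMap_cons, List.foldl_append, List.foldl_cons]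
    rw [parse_pad8 a c hc.1 hc.2]
    exact ih (fun x hx => hg x (by simp [hx])) _

-- every element of a chunk is an element of the chunked list
lemma mem_chunkA {α : Type} (l : List α) (n : Nat) (g : List α) (hg : g ∈ chunkA l n)
    (x : α) (hx : x ∈ g) : x ∈ l := by
  induction hL : l.length using Nat.strong_induction_on generalizing l with
  | _ L IH =>
  subst hL
  rw [chunkA] at hg
  split at hg
  · simp at hg
  · rename_i h
    push_neg at h
    rcases List.mem_cons.mp hg with hh | ht
    · subst hh; exact List.mem_of_mem_take hx
    · have hlt : (l.drop n).length < l.length := by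
        have : l.length ≠ 0 := by
          simpa using (fun hl => h.2 (List.eq_nil_of_length_eq_zero hl))
        simp [List.length_drop]; omega
      exact List.mem_of_mem_drop (IH _ hlt _ ht rfl)

-- ===== VERDICT (by name: the statement is the Claim_ definition above) =====
theorem readMsg_spec : Claim_equal_readMsg := by
  intro str blockSize hDom hPre
  unfold Spec_readMsg readMsg readMsg_alt
  unfold Pre_readMsg at hPre
  have hbs : 0 ≤ blockSize := by omega
  have htd8 : blockSize.tdiv 8 = blockSize / 8 := Int.tdiv_eq_ediv_of_nonneg hbs
  have htd64 : blockSize.tdiv 64 = blockSize / 64 := Int.tdiv_eq_ediv_of_nonneg hbs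
  have hnb : 0 < blockSize.tdiv 8 := by
    rw [htd8]; omega
  have hk : 0 < blockSize.tdiv 64 := by
    rw [htd64]; omega
  simp only []
  -- byte list and its padded form
  set arr0 : List Int := str.toList.map (fun c => (c.toNat : Int)) with harr0
  set nb : Int := blockSize.tdiv 8 with hnbdef
  set padded : List Int := arr0 ++ List.replicate (PySem.Int.mod (-(arr0.length : Int)) nb).toNat 0
    with hpadded
  have hpad := pad_eq arr0 nb hnb
  rw [hpad]
  -- every byte of padded is in [0, 256)
  have hbytes : ∀ c ∈ padded, 0 ≤ c ∧ c < 256 := by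
    intro c hc
    rw [hpadded] at hc
    rcases List.mem_append.mp hc with h | h
    · rw [harr0] at h
      rcases List.mem_map.mp h with ⟨ch, hch, hrep⟩
      have hdom : pvDomChar ch = true := by
        unfold Dom_readMsg pvDomStr at hDom
        simp only [Bool.and_eq_true, List.all_eq_true] at hDom
        exact hDom.1 ch hch
      unfold pvDomChar at hdom
      subst hrep
      simp only [Bool.or_eq_true, Bool.and_eq_true, decide_eq_true_eq, beq_iff_eq] at hdom
      omega
    · have : c = 0 := List.eq_of_mem_replicate h
      omega
  -- middle step: chunk by 8 and per-chunk values agree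
  have h8 : (8 : Int).toNat = 8 := rfl
  have hch8 := chunkB_eq 8 (by omega) padded
  rw [h8] at hch8
  have hmid :
      ((chunkA padded 8).map (fun sub => sub.flatMap (fun c => padRightA (pyBinA c) '0' 8))).map
        parseBinA
      = (PySem.List.pyRange 0 (padded.length : Int) 8).map
          (fun i => fromBytesBE (PySem.List.slice padded (some i) (some (i + 8)))) := by
    have : (PySem.List.pyRange 0 (padded.length : Int) 8).map
          (fun i => fromBytesBE (PySem.List.slice padded (some i) (some (i + 8))))
        = ((PySem.List.pyRange 0 (padded.length : Int) 8).map
            (fun i => PySem.List.slice padded (some i) (some (i + 8)))).map fromBytesBE := by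
      rw [List.map_map]
      simp [Function.comp]
    rw [this, hch8, List.map_map]
    apply List.map_congr_left
    intro g hgmem
    simp only [Function.comp]
    exact parse_chunk g (fun c hc => hbytes c (mem_chunkA padded 8 g hgmem c hc))
  rw [hmid]
  -- final chunking
  exact (chunkB_eq (blockSize.tdiv 64) hk _).symm
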